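-- pv_equiv track=rewrite | github.com/volkb79-2/vbpub | game_stuff/empyrion/empyrion_localize.py | _restore_newline_placeholders_from_text
-- ===== SOURCE A (Python) =====
-- from typing import Dict, List, Set, Tuple
--
-- def _restore_newline_placeholders_from_text(
--     text: str,
--     ordered_newline_tokens: List[str],
-- ) -> str:
--     if not text or not ordered_newline_tokens:
--         return text
--
--     restored = text
--     for token in ordered_newline_tokens:
--         if "\n" in restored:
--             restored = restored.replace("\n", token, 1)
--             continue
--         if "\\n" in restored:
--             restored = restored.replace("\\n", token, 1)
--     return restored
-- ===== SOURCE B (Python) =====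
-- def _restore_newline_placeholders_from_text(text, ordered_newline_tokens):
--     if not text or not ordered_newline_tokens:
--         return text
--     n_real = text.count("\n")
--     k = min(len(ordered_newline_tokens), n_real)
--     real_tokens = ordered_newline_tokens[:k]
--     lit_tokens = ordered_newline_tokens[k:]
--     ri = 0
--     li = 0
--     out = []
--     i = 0
--     L = len(text)
--     while i < L:
--         c = text[i]
--         if c == "\n" and ri < len(real_tokens):
--             out.append(real_tokens[ri])
--             ri += 1
--             i += 1
--         elif c == "\\" and i + 1 < L and text[i + 1] == "n" and li < len(lit_tokens):
--             out.append(lit_tokens[li])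
--             li += 1
--             i += 2
--         else:
--             out.append(c)
--             i += 1
--     return "".join(out)
-- ===== Notes on version B (the rewrite author's own statement) =====
-- stated objective: faster
-- what changed: Instead of repeatedly rescanning and rebuilding the whole string once per token (str.replace(...,1) per token, with a two-phase priority of real '\n' over literal '\\n'), B counts the real newlines once, splits the token list at that point, and does a single left-to-right pass over the text emitting the next real-newline token at each '\n' and the next literal token at each '\\n'.
-- outside the precondition, e.g. on _restore_newline_placeholders_from_text('\n', ['a\nb', 'c']): A returns 'acb', B returns 'a\nb'; on _restore_newline_placeholders_from_text('\\\n', ['n', 'X']): A returns 'X', B returns '\\n'; on _restore_newline_placeholders_from_text('\\\nn', ['', 'Y']): A returns 'Y', B returns '\\n'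
import Mathlib
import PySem

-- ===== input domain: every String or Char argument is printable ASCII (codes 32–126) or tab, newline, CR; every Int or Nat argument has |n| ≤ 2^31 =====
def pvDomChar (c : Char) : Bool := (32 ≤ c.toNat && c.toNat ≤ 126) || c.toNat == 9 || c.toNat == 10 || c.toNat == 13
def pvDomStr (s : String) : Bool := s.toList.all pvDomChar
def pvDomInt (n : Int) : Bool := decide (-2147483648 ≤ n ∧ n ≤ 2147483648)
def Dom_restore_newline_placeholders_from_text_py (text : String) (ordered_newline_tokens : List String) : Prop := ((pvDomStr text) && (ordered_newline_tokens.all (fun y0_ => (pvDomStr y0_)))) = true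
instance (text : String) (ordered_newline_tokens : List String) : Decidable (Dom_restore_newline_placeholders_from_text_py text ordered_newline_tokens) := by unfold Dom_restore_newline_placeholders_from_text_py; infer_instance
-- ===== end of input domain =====

-- B replaces A's per-token full-string rescans (str.replace(..., 1) once per token) by one
-- left-to-right pass over the text after counting the real newlines once; objective: faster.


-- ===== PORT A =====
-- s.replace(old, new, 1); exact for nonempty `old` (A only calls it with "\n" and "\\n")
def pvReplaceOnce (s old t : List Char) : List Char :=
  let i := PySem.Chars.find s old
  if i = -1 then s
  else s.take i.toNat ++ t ++ s.drop (i.toNat + old.length)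

-- the `for token in ordered_newline_tokens` loop of A
def pvALoop : List (List Char) → List Char → List Char
  | [], restored => restored
  | t :: rest, restored =>
    if PySem.Chars.isIn ['\n'] restored then
      pvALoop rest (pvReplaceOnce restored ['\n'] t)
    else if PySem.Chars.isIn ['\\', 'n'] restored then
      pvALoop rest (pvReplaceOnce restored ['\\', 'n'] t)
    else
      pvALoop rest restored

def restore_newline_placeholders_from_text_py (text : String) (ordered_newline_tokens : List String) : String :=
  if text.toList = [] ∨ ordered_newline_tokens = [] then text
  else String.ofList (pvALoop (ordered_newline_tokens.map String.toList) text.toList)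

-- ===== PORT B =====
-- the single left-to-right while-loop of B: at '\n' emit the next real-newline token,
-- at '\\' 'n' emit the next literal token (if any tokens remain in the respective list)
def pvScan : List (List Char) → List (List Char) → List Char → List Char
  | t :: ts, lit, '\n' :: rest => t ++ pvScan ts lit rest
  | [], lit, '\n' :: rest => '\n' :: pvScan [] lit rest
  | real, t :: ts, '\\' :: 'n' :: rest => t ++ pvScan real ts rest
  | real, lit, c :: rest => c :: pvScan real lit rest
  | _, _, [] => []

def restore_newline_placeholders_from_text_py_alt (text : String) (ordered_newline_tokens : List String) : String :=
  if text.toList = [] ∨ ordered_newline_tokens = [] then text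
  else
    let n_real := PySem.Str.count text "\n"
    let k := min ordered_newline_tokens.length n_real
    let toks := ordered_newline_tokens.map String.toList
    String.ofList (pvScan (toks.take k) (toks.drop k) text.toList)

-- ===== PRECONDITION & SPEC =====
-- number of non-overlapping "\\n" occurrences ("\\n" cannot overlap itself)
def pvCntLit : List Char → Nat
  | '\\' :: 'n' :: r => pvCntLit r + 1
  | _ :: r => pvCntLit r
  | [] => 0

def pvSafeTok (t : List Char) : Prop :=
  t ≠ [] ∧ '\n' ∉ t ∧ t.head? ≠ some 'n' ∧ t.getLast? ≠ some '\\' ∧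
    PySem.Chars.isIn ['\\', 'n'] t = false

-- Pre_ excludes inputs where a token that actually gets inserted can splice with the text
-- into a NEW "\n"/"\\n" occurrence that a later token then replaces (tokens containing
-- "\n", and — when literal "\\n" replacement can be reached, i.e. the tokens outnumber the
-- real newlines — inserted tokens that are empty, contain "\\n", start with 'n' or end with
-- '\\'): there A re-replaces material it itself inserted, an artefact of the repeated
-- re-scanning str.replace. Tokens past the first count("\n")+count("\\n") are never
-- inserted and stay unconstrained.
def Pre_restore_newline_placeholders_from_text_py (text : String) (ordered_newline_tokens : List String) : Prop :=
  if ordered_newline_tokens.length ≤ text.toList.count '\n' then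
    ∀ u ∈ ordered_newline_tokens, '\n' ∉ u.toList
  else
    ∀ u ∈ ordered_newline_tokens.take (text.toList.count '\n' + pvCntLit text.toList),
      pvSafeTok u.toList

instance (text : String) (ordered_newline_tokens : List String) : Decidable (Pre_restore_newline_placeholders_from_text_py text ordered_newline_tokens) := by
  unfold Pre_restore_newline_placeholders_from_text_py pvSafeTok; infer_instance

def pvWitness_restore_newline_placeholders_from_text_py : String × List String :=
  ("a\nb\\nc", ["<1>", "<2>"])

def Spec_restore_newline_placeholders_from_text_py (text : String) (ordered_newline_tokens : List String) (out : String) : Prop := out = restore_newline_placeholders_from_text_py_alt text ordered_newline_tokens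
instance (text : String) (ordered_newline_tokens : List String) (out : String) : Decidable (Spec_restore_newline_placeholders_from_text_py text ordered_newline_tokens out) := by unfold Spec_restore_newline_placeholders_from_text_py; infer_instance

-- ===== CLAIM (what is proved, stated in full; the proofs are below) =====
def Claim_equal_restore_newline_placeholders_from_text_py : Prop := ∀ (text : String) (ordered_newline_tokens : List String), Dom_restore_newline_placeholders_from_text_py text ordered_newline_tokens → Pre_restore_newline_placeholders_from_text_py text ordered_newline_tokens → Spec_restore_newline_placeholders_from_text_py text ordered_newline_tokens (restore_newline_placeholders_from_text_py text ordered_newline_tokens)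

-- ===== LEMMAS AND PROOFS =====

theorem pvCntLit_cons (c : Char) (r : List Char)
    (h : c = '\\' → r.head? ≠ some 'n') : pvCntLit (c :: r) = pvCntLit r := by
  rw [pvCntLit.eq_def]
  split
  · rename_i heq; injection heq with hA hB; subst hA; subst hB; simp at h
  · rename_i heq; injection heq with hA hB; rw [hB]
  · rename_i heq; cases heq
theorem pvScan_cons (real lit : List (List Char)) (c : Char) (rest : List Char)
    (h1 : c ≠ '\n') (h2 : c = '\\' → lit = [] ∨ rest.head? ≠ some 'n') :
    pvScan real lit (c :: rest) = c :: pvScan real lit rest := by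
  rw [pvScan.eq_def]
  split
  · rename_i heq; injection heq; simp_all
  · rename_i heq; injection heq; simp_all
  · rename_i t ts rest' heq h; injection h with h3 h4
    subst h3; rcases h2 rfl with h | h
    · simp_all
    · simp_all
  · rename_i heq _ _ heq2; injection heq2 with hA hB; rw [hA, hB]
  · rename_i h; cases h
theorem pvScan_nil_nil (s : List Char) : pvScan [] [] s = s := by
  induction s using pvCntLit.induct with
  | case1 r ih =>
    rw [pvScan_cons [] [] '\\' ('n'::r) (by decide) (fun _ => Or.inl rfl)]
    rw [pvScan_cons [] [] 'n' r (by decide) (by simp)]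
    rw [ih]
  | case2 c r h ih =>
    by_cases hc : c = '\n'
    · subst hc; simp [pvScan, ih]
    · rw [pvScan_cons [] [] c r hc (fun _ => Or.inl rfl), ih]
  | case3 => simp [pvScan]
theorem pvScan_safe (real lit : List (List Char)) (s : List Char)
    (h1 : '\n' ∉ s) (h2 : pvCntLit s = 0) : pvScan real lit s = s := by
  induction s using pvCntLit.induct with
  | case1 r ih => simp [pvCntLit] at h2
  | case2 c r h ih =>
    have hg : c = '\\' → r.head? ≠ some 'n' := by
      intro hc hr
      rcases r with _ | ⟨rh, rt⟩
      · simp at hr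
      · simp at hr; exact h rt hc (by rw [hr])
    have hc : c ≠ '\n' := fun hh => h1 (hh ▸ List.mem_cons_self)
    have hr : pvCntLit r = 0 := by rwa [pvCntLit_cons c r hg] at h2
    rw [pvScan_cons real lit c r hc (fun hcc => Or.inr (hg hcc))]
    rw [ih (fun hm => h1 (List.mem_cons_of_mem _ hm)) hr]
  | case3 => simp [pvScan]
theorem pvCntLit_eq_zero (s : List Char) (h : ∀ j, ¬ ['\\', 'n'] <+: s.drop j) :
    pvCntLit s = 0 := by
  induction s using pvCntLit.induct with
  | case1 r ih => exact absurd (by simp : ['\\', 'n'] <+: List.drop 0 ('\\'::'n'::r)) (h 0)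
  | case2 c r hg ih =>
    have hs : c = '\\' → r.head? ≠ some 'n' := by
      intro hc hr
      rcases r with _ | ⟨rh, rt⟩
      · simp at hr
      · simp at hr; exact hg rt hc (by rw [hr])
    rw [pvCntLit_cons c r hs]
    exact ih (fun j => h (j + 1))
  | case3 => rfl
theorem pvScan_append (real lit : List (List Char)) (p q : List Char)
    (h1 : '\n' ∉ p) (h2 : p.getLast? = some '\\' → q.head? ≠ some 'n') :
    pvScan real lit (p ++ q) = pvScan [] lit p ++ pvScan real (lit.drop (pvCntLit p)) q := by
  induction p using pvCntLit.induct generalizing lit with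
  | case1 r ih =>
    have hlast : r.getLast? = some '\\' → q.head? ≠ some 'n' := by
      intro hr; apply h2
      rcases r with _ | _
      · simp at hr
      · rw [← hr]; simp [List.getLast?_cons_cons]
    have hnl : '\n' ∉ r := fun hm => h1 (by simp [hm])
    have hcnt : pvCntLit ('\\'::'n'::r) = pvCntLit r + 1 := by simp [pvCntLit]
    rcases lit with _ | ⟨t, ts⟩
    · rw [List.cons_append, List.cons_append]
      rw [pvScan_cons real [] '\\' ('n'::(r++q)) (by decide) (fun _ => Or.inl rfl)]
      rw [pvScan_cons real [] 'n' (r++q) (by decide) (by simp)]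
      rw [pvScan_cons [] [] '\\' ('n'::r) (by decide) (fun _ => Or.inl rfl)]
      rw [pvScan_cons [] [] 'n' r (by decide) (by simp)]
      rw [ih [] hnl hlast]
      simp [hcnt]
    · rw [List.cons_append, List.cons_append]
      have e1 : pvScan real (t::ts) ('\\'::'n'::(r++q)) = t ++ pvScan real ts (r++q) := by
        simp [pvScan]
      have e2 : pvScan [] (t::ts) ('\\'::'n'::r) = t ++ pvScan [] ts r := by
        simp [pvScan]
      rw [e1, e2, ih ts hnl hlast, hcnt]
      simp [List.drop_succ_cons]
  | case2 c r hg ih =>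
    have hs : c = '\\' → r.head? ≠ some 'n' := by
      intro hc hr
      rcases r with _ | ⟨rh, rt⟩
      · simp at hr
      · simp at hr; exact hg rt hc (by rw [hr])
    have hc : c ≠ '\n' := fun hh => h1 (hh ▸ List.mem_cons_self)
    have hnl : '\n' ∉ r := fun hm => h1 (List.mem_cons_of_mem _ hm)
    have hlast : r.getLast? = some '\\' → q.head? ≠ some 'n' := by
      intro hr; apply h2
      rcases r with _ | _
      · simp at hr
      · rw [← hr]; simp [List.getLast?_cons_cons]
    have hbig : c = '\\' → (r ++ q).head? ≠ some 'n' := by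
      intro hcc
      rcases r with _ | ⟨rh, rt⟩
      · simpa using h2 (by simp [hcc])
      · simpa using hs hcc
    rw [List.cons_append]
    rw [pvScan_cons real lit c (r++q) hc (fun hcc => Or.inr (hbig hcc))]
    rw [pvScan_cons [] lit c r hc (fun hcc => Or.inr (hs hcc))]
    rw [ih lit hnl hlast, pvCntLit_cons c r hs]
    simp
  | case3 => simp [pvScan, pvCntLit]
theorem pvScan_noLit (real : List (List Char)) (p q : List Char) (h1 : '\n' ∉ p) :
    pvScan real [] (p ++ q) = p ++ pvScan real [] q := by
  induction p with
  | nil => rfl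
  | cons c r ih =>
    have hc : c ≠ '\n' := fun hh => h1 (hh ▸ List.mem_cons_self)
    rw [List.cons_append, pvScan_cons real [] c (r ++ q) hc (fun _ => Or.inl rfl)]
    rw [ih (fun hm => h1 (List.mem_cons_of_mem _ hm)), List.cons_append]

theorem pvCntLit_append (a b : List Char)
    (h : a.getLast? = some '\\' → b.head? ≠ some 'n') :
    pvCntLit (a ++ b) = pvCntLit a + pvCntLit b := by
  induction a using pvCntLit.induct with
  | case1 r ih =>
    have hlast : r.getLast? = some '\\' → b.head? ≠ some 'n' := by
      intro hr; apply h
      rcases r with _ | _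
      · simp at hr
      · rw [← hr]; simp [List.getLast?_cons_cons]
    have e1 : pvCntLit ('\\'::'n'::(r ++ b)) = pvCntLit (r ++ b) + 1 := by simp [pvCntLit]
    have e2 : pvCntLit ('\\'::'n'::r) = pvCntLit r + 1 := by simp [pvCntLit]
    rw [List.cons_append, List.cons_append, e1, e2, ih hlast]
    omega
  | case2 c r hg ih =>
    have hs : c = '\\' → r.head? ≠ some 'n' := by
      intro hc hr
      rcases r with _ | ⟨rh, rt⟩
      · simp at hr
      · simp at hr; exact hg rt hc (by rw [hr])
    have hlast : r.getLast? = some '\\' → b.head? ≠ some 'n' := by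
      intro hr; apply h
      rcases r with _ | _
      · simp at hr
      · rw [← hr]; simp [List.getLast?_cons_cons]
    have hbig : c = '\\' → (r ++ b).head? ≠ some 'n' := by
      intro hcc
      rcases r with _ | ⟨rh, rt⟩
      · simpa using h (by simp [hcc])
      · simpa using hs hcc
    rw [List.cons_append, pvCntLit_cons c (r ++ b) hbig, pvCntLit_cons c r hs, ih hlast]
  | case3 => simp [pvCntLit]

theorem pvReplaceOnce_split (s sub t : List Char) (hne : sub ≠ [])
    (h : PySem.Chars.isIn sub s = true) :
    ∃ p suf, s = p ++ sub ++ suf ∧ pvReplaceOnce s sub t = p ++ t ++ suf ∧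
      (∀ j, ¬ sub <+: p.drop j) := by
  have hinf : sub <:+: s := (PySem.Chars.isIn_iff_infix sub s).mp h
  have hnn : 0 ≤ PySem.Chars.find s sub := (PySem.Chars.find_nonneg_iff s sub).mpr hinf
  obtain ⟨hpre, hmin⟩ := PySem.Chars.find_spec hnn
  set i := (PySem.Chars.find s sub).toNat with hi
  obtain ⟨suf, hsuf⟩ := hpre
  refine ⟨s.take i, suf, ?_, ?_, ?_⟩
  · conv_lhs => rw [← List.take_append_drop i s]
    rw [← hsuf, List.append_assoc]
  · unfold pvReplaceOnce
    have : ¬ PySem.Chars.find s sub = -1 := by omega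
    simp only [this, if_false]
    have hdrop : s.drop (i + sub.length) = suf := by
      rw [← List.drop_drop, ← hsuf, List.drop_left]
    rw [hdrop]
  · intro j hj
    have hjp : sub <+: (s.drop j).take (i - j) := by rwa [← List.drop_take]
    by_cases hij : j < i
    · exact hmin j hij (hjp.trans (List.take_prefix _ _))
    · have : i - j = 0 := by omega
      rw [this, List.take_zero] at hjp
      exact hne (List.prefix_nil.mp hjp)

theorem pvCountGo (fuel : Nat) (s : List Char) (acc : Nat) (h : s.length ≤ fuel) :
    PySem.Chars.count.go ['\n'] fuel s acc = acc + s.count '\n' := by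
  induction fuel generalizing s acc with
  | zero =>
    have : s = [] := by cases s <;> simp_all
    subst this; simp [PySem.Chars.count.go]
  | succ f ih =>
    cases s with
    | nil => simp [PySem.Chars.count.go]
    | cons c r =>
      rw [PySem.Chars.count.go]
      by_cases hc : c = '\n'
      · subst hc
        simp only [List.isPrefixOf, BEq.rfl, Bool.true_and, if_true]
        rw [ih _ _ (by simpa using h)]
        simp
        omega
      · have hns : ¬ ('\n' = c) := fun hh => hc hh.symm
        have hpf : (['\n'].isPrefixOf (c :: r)) = false := by
          simp [List.isPrefixOf, hns]
        rw [hpf]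
        simp only [Bool.false_eq_true, if_false]
        rw [ih _ _ (by simpa using h)]
        simp [hc]

theorem pvCount_singleton (s : List Char) :
    PySem.Chars.count s ['\n'] = s.count '\n' := by
  rw [PySem.Chars.count]
  simp only [List.isEmpty_cons, if_false, Bool.false_eq_true]
  simpa using pvCountGo s.length s 0 le_rfl
theorem pvNoOcc (sub s : List Char) (h : PySem.Chars.isIn sub s = false) :
    ∀ j, ¬ sub <+: s.drop j := by
  intro j hj
  have := (PySem.Chars.exists_prefix_drop_iff_isIn sub s).mp ⟨j, hj⟩
  rw [h] at this; cases this

theorem pvMemPrefixDrop (a : Char) (p : List Char) (hm : a ∈ p) : ∃ j, [a] <+: p.drop j :=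
  (PySem.Chars.exists_prefix_drop_iff_isIn [a] p).mpr
    ((PySem.Chars.isIn_iff_infix [a] p).mpr ((List.singleton_infix_iff a p).mpr hm))

theorem pvNotMem (a : Char) (s : List Char) (h : PySem.Chars.isIn [a] s = false) : a ∉ s := by
  intro hm
  obtain ⟨j, hj⟩ := pvMemPrefixDrop a s hm
  exact pvNoOcc [a] s h j hj

theorem pvALoop_eq : ∀ (toks : List (List Char)) (restored : List Char), pvALoop toks restored = (match toks with
  | [] => restored
  | t :: rest =>
    if PySem.Chars.isIn ['\n'] restored then pvALoop rest (pvReplaceOnce restored ['\n'] t)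
    else if PySem.Chars.isIn ['\\', 'n'] restored then pvALoop rest (pvReplaceOnce restored ['\\', 'n'] t)
    else pvALoop rest restored) := fun toks r => by cases toks <;> rfl

theorem pvMain (toks : List (List Char)) (s : List Char)
    (hsafe : ∀ u ∈ toks.take (s.count '\n' + pvCntLit s), pvSafeTok u) :
    pvALoop toks s =
      pvScan (toks.take (min toks.length (s.count '\n')))
             (toks.drop (min toks.length (s.count '\n'))) s := by
  induction toks generalizing s with
  | nil => simpa [pvALoop] using (pvScan_nil_nil s).symm
  | cons t rest ih =>
    have hsafe_t : 0 < s.count '\n' + pvCntLit s → pvSafeTok t := by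
      intro hpos
      apply hsafe t
      obtain ⟨m, hm⟩ : ∃ m, s.count '\n' + pvCntLit s = m + 1 :=
        ⟨_, (Nat.succ_pred_eq_of_pos hpos).symm⟩
      rw [hm, List.take_succ_cons]
      exact List.mem_cons_self
    by_cases hNL : PySem.Chars.isIn ['\n'] s = true
    · obtain ⟨p, suf, hs, hrepl, hmin⟩ := pvReplaceOnce_split s ['\n'] t (by decide) hNL
      have hpnl : '\n' ∉ p := by
        intro hm
        obtain ⟨j, hj⟩ := pvMemPrefixDrop '\n' p hm
        exact hmin j hj
      have hcount : s.count '\n' = suf.count '\n' + 1 := by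
        subst hs
        simp [List.count_append, List.count_eq_zero.mpr hpnl]
      obtain ⟨htne, htnl, hthead, htlast, htlit⟩ := hsafe_t (by omega)
      have htcnt : pvCntLit t = 0 := pvCntLit_eq_zero t (pvNoOcc _ _ htlit)
      have hthd : ∀ q : List Char, (t ++ q).head? ≠ some 'n' := by
        intro q
        rcases t with _ | ⟨c, r⟩
        · exact absurd rfl htne
        · simpa using fun hh => hthead (by simp [hh])
      have hcount2 : (p ++ t ++ suf).count '\n' = suf.count '\n' := by
        simp [List.count_append, List.count_eq_zero.mpr hpnl, List.count_eq_zero.mpr htnl]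
      have hlit2 : pvCntLit (p ++ t ++ suf) = pvCntLit s := by
        rw [hs, List.append_assoc, List.append_assoc]
        rw [pvCntLit_append p _ (fun _ => hthd suf),
            pvCntLit_append p _ (by intro _; simp),
            pvCntLit_append t suf (fun hl => absurd hl htlast), htcnt,
            List.singleton_append,
            pvCntLit_cons '\n' suf (by intro hh; exact absurd hh (by decide))]
        omega
      have hrest : ∀ u ∈ rest.take ((p ++ t ++ suf).count '\n' + pvCntLit (p ++ t ++ suf)),
          pvSafeTok u := by
        intro u hu
        apply hsafe u
        have e : s.count '\n' + pvCntLit s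
            = ((p ++ t ++ suf).count '\n' + pvCntLit (p ++ t ++ suf)) + 1 := by
          rw [hlit2, hcount2]; omega
        rw [e, List.take_succ_cons]
        exact List.mem_cons_of_mem _ hu
      rw [pvALoop_eq, hNL]
      simp only [if_true, hrepl]
      rw [ih _ hrest, hcount2, hcount]
      set k := min rest.length (suf.count '\n') with hk
      have hkk : min (t :: rest).length (suf.count '\n' + 1) = k + 1 := by
        simp [hk, Nat.succ_min_succ]
      rw [hkk, List.take_succ_cons, List.drop_succ_cons]
      conv_rhs => rw [hs, List.append_assoc, List.singleton_append]
      rw [pvScan_append _ _ p ('\n'::suf) hpnl (by intro _; simp)]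
      have e1 : pvScan (t :: rest.take k) (List.drop (pvCntLit p) (rest.drop k)) ('\n'::suf)
          = t ++ pvScan (rest.take k) (List.drop (pvCntLit p) (rest.drop k)) suf := by
        simp [pvScan]
      rw [e1]
      rw [List.append_assoc, pvScan_append _ _ p (t ++ suf) hpnl (fun _ => hthd suf)]
      rw [pvScan_append _ _ t suf htnl (fun hlast => absurd hlast htlast), htcnt, List.drop_zero]
      rw [pvScan_safe [] _ t htnl htcnt]
    · replace hNL : PySem.Chars.isIn ['\n'] s = false := by
        cases hq : PySem.Chars.isIn ['\n'] s
        · rfl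
        · exact absurd hq hNL
      have hsnl : '\n' ∉ s := pvNotMem _ _ hNL
      have hc0 : s.count '\n' = 0 := List.count_eq_zero.mpr hsnl
      by_cases hLit : PySem.Chars.isIn ['\\', 'n'] s = true
      · obtain ⟨p, suf, hs, hrepl, hmin⟩ := pvReplaceOnce_split s ['\\', 'n'] t (by decide) hLit
        have hpcnt : pvCntLit p = 0 := pvCntLit_eq_zero p hmin
        have hpnl : '\n' ∉ p := fun hm => hsnl (hs ▸ (by simp [hm]))
        have hsufnl : '\n' ∉ suf := fun hm => hsnl (hs ▸ (by simp [hm]))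
        have hlits : pvCntLit s = pvCntLit suf + 1 := by
          rw [hs, List.append_assoc]
          rw [pvCntLit_append p _ (by intro _; simp), hpcnt]
          have : pvCntLit ('\\' :: 'n' :: suf) = pvCntLit suf + 1 := by simp [pvCntLit]
          simpa using this
        obtain ⟨htne, htnl, hthead, htlast, htlit⟩ := hsafe_t (by omega)
        have htcnt : pvCntLit t = 0 := pvCntLit_eq_zero t (pvNoOcc _ _ htlit)
        have hthd : ∀ q : List Char, (t ++ q).head? ≠ some 'n' := by
          intro q
          rcases t with _ | ⟨c, r⟩
          · exact absurd rfl htne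
          · simpa using fun hh => hthead (by simp [hh])
        have hcount2 : (p ++ t ++ suf).count '\n' = 0 := by
          simp [List.count_append, List.count_eq_zero.mpr hpnl,
            List.count_eq_zero.mpr htnl, List.count_eq_zero.mpr hsufnl]
        have hlit2 : pvCntLit (p ++ t ++ suf) = pvCntLit suf := by
          rw [List.append_assoc]
          rw [pvCntLit_append p _ (fun _ => hthd suf), hpcnt,
              pvCntLit_append t suf (fun hl => absurd hl htlast), htcnt]
          omega
        have hrest : ∀ u ∈ rest.take ((p ++ t ++ suf).count '\n' + pvCntLit (p ++ t ++ suf)),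
            pvSafeTok u := by
          intro u hu
          apply hsafe u
          have e : s.count '\n' + pvCntLit s
              = ((p ++ t ++ suf).count '\n' + pvCntLit (p ++ t ++ suf)) + 1 := by
            rw [hlit2, hcount2, hc0, hlits]
            omega
          rw [e, List.take_succ_cons]
          exact List.mem_cons_of_mem _ hu
        rw [pvALoop_eq, hNL]
        simp only [Bool.false_eq_true, if_false, hLit, if_true, hrepl]
        rw [ih _ hrest, hcount2, hc0]
        simp only [Nat.min_zero, List.take_zero, List.drop_zero]
        conv_rhs => rw [hs, List.append_assoc]
        rw [pvScan_append _ _ p (['\\','n'] ++ suf) hpnl (by intro _; simp), hpcnt, List.drop_zero]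
        have e1 : pvScan [] (t :: rest) (['\\','n'] ++ suf) = t ++ pvScan [] rest suf := by
          simp [pvScan]
        rw [e1, pvScan_safe [] (t::rest) p hpnl hpcnt]
        rw [List.append_assoc, pvScan_append _ _ p (t ++ suf) hpnl (fun _ => hthd suf), hpcnt, List.drop_zero]
        rw [pvScan_append _ _ t suf htnl (fun hlast => absurd hlast htlast), htcnt, List.drop_zero]
        rw [pvScan_safe [] rest p hpnl hpcnt, pvScan_safe [] rest t htnl htcnt]
      · replace hLit : PySem.Chars.isIn ['\\', 'n'] s = false := by
          cases hq : PySem.Chars.isIn ['\\', 'n'] s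
          · rfl
          · exact absurd hq hLit
        have hscnt : pvCntLit s = 0 := pvCntLit_eq_zero s (pvNoOcc _ _ hLit)
        rw [pvALoop_eq, hNL]
        simp only [Bool.false_eq_true, if_false, hLit]
        have hrest : ∀ u ∈ rest.take (s.count '\n' + pvCntLit s), pvSafeTok u := by
          rw [hc0, hscnt]
          intro u hu
          simp at hu
        rw [ih _ hrest, hc0]
        simp only [Nat.min_zero, List.take_zero, List.drop_zero]
        rw [pvScan_safe [] rest s hsnl hscnt, pvScan_safe [] (t::rest) s hsnl hscnt]

theorem pvMainRelaxed (toks : List (List Char)) (s : List Char)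
    (hlen : toks.length ≤ s.count '\n')
    (hnl : ∀ u ∈ toks, '\n' ∉ u) :
    pvALoop toks s = pvScan toks [] s := by
  induction toks generalizing s with
  | nil => simpa [pvALoop] using (pvScan_nil_nil s).symm
  | cons t rest ih =>
    have htnl : '\n' ∉ t := hnl t List.mem_cons_self
    have hcpos : 0 < s.count '\n' := by
      have := hlen; simp at this; omega
    have hmem : '\n' ∈ s := List.count_pos_iff.mp hcpos
    have hNL : PySem.Chars.isIn ['\n'] s = true :=
      (PySem.Chars.isIn_iff_infix _ _).mpr ((List.singleton_infix_iff '\n' s).mpr hmem)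
    obtain ⟨p, suf, hs, hrepl, hmin⟩ := pvReplaceOnce_split s ['\n'] t (by decide) hNL
    have hpnl : '\n' ∉ p := by
      intro hm
      obtain ⟨j, hj⟩ := pvMemPrefixDrop '\n' p hm
      exact hmin j hj
    have hcount : s.count '\n' = suf.count '\n' + 1 := by
      subst hs
      simp [List.count_append, List.count_eq_zero.mpr hpnl]
    have hcount2 : (p ++ t ++ suf).count '\n' = suf.count '\n' := by
      simp [List.count_append, List.count_eq_zero.mpr hpnl, List.count_eq_zero.mpr htnl]
    rw [pvALoop_eq, hNL]
    simp only [if_true, hrepl]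
    rw [ih _ (by rw [hcount2]; have := hlen; simp at this; omega)
          (fun u hu => hnl u (List.mem_cons_of_mem _ hu))]
    conv_rhs => rw [hs, List.append_assoc, List.singleton_append]
    rw [pvScan_noLit _ p _ hpnl]
    have e1 : pvScan (t :: rest) [] ('\n'::suf) = t ++ pvScan rest [] suf := by
      simp [pvScan]
    rw [e1]
    rw [List.append_assoc, pvScan_noLit _ p _ hpnl, pvScan_noLit _ t _ htnl]

-- ===== VERDICT (by name: the statement is the Claim_ definition above) =====
theorem restore_newline_placeholders_from_text_py_spec : Claim_equal_restore_newline_placeholders_from_text_py := by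
  intro text toks _ hpre
  unfold Spec_restore_newline_placeholders_from_text_py
  unfold restore_newline_placeholders_from_text_py restore_newline_placeholders_from_text_py_alt
  by_cases hg : text.toList = [] ∨ toks = []
  · rw [if_pos hg, if_pos hg]
  · rw [if_neg hg, if_neg hg]
    unfold Pre_restore_newline_placeholders_from_text_py at hpre
    by_cases hbr : toks.length ≤ text.toList.count '\n'
    · rw [if_pos hbr] at hpre
      have hnl : ∀ u ∈ toks.map String.toList, '\n' ∉ u := by
        intro u hu
        obtain ⟨v, hv, rfl⟩ := List.mem_map.mp hu
        exact hpre v hv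
      have hlen : (toks.map String.toList).length ≤ text.toList.count '\n' := by
        simpa using hbr
      rw [pvMainRelaxed _ _ hlen hnl]
      have hk2 : min toks.length (List.count '\n' text.toList) = toks.length := by omega
      simp [pvCount_singleton, hk2, List.take_of_length_le, List.drop_of_length_le]
    · rw [if_neg hbr] at hpre
      have hsafe : ∀ u ∈ (toks.map String.toList).take
          (text.toList.count '\n' + pvCntLit text.toList), pvSafeTok u := by
        intro u hu
        rw [← List.map_take] at hu
        obtain ⟨v, hv, rfl⟩ := List.mem_map.mp hu
        exact hpre v hv
      rw [pvMain _ _ hsafe]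
      simp [pvCount_singleton, List.length_map]
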